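-- pv_equiv track=rewrite | github.com/lhgking1014/test1 | Tesla_news/fetch_news.py | parse_nitter_markdown
-- ===== SOURCE A (Python) =====
-- from typing import Iterable, List, Sequence, Set
--
-- def parse_nitter_markdown(markdown: str) -> List[str]:
--     posts: List[str] = []
--     current: List[str] = []
--     for raw_line in markdown.splitlines():
--         line = raw_line.strip()
--         if not line:
--             if current:
--                 posts.append(" ".join(current))
--                 current = []
--             continue
--         if line.startswith("Title:") or line.startswith("URL Source:") or line.startswith("Markdown Content:"):
--             continue
--         if line.startswith("Warning:"):
--             continue
--         if line.startswith("[![") and "](" in line: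
--             continue
--         if line.startswith("[]"):
--             continue
--         if "| nitter" in line:
--             continue
--         if line.startswith("http://nitter.net") or line.startswith("https://nitter.net"):
--             continue
--         if line.startswith("* "):
--             continue
--         simplified = line.replace(",", "").replace(".", "")
--         if simplified.isdigit():
--             continue
--         if all(ch in "-=_*" for ch in line):
--             continue
--         if line in {"GIF", "Video"}:
--             continue
--         current.append(line)
--     if current:
--         posts.append(" ".join(current))
--
--     cleaned: List[str] = []
--     seen = set()
--     for post in posts:
--         normalized = " ".join(post.split())
--         if not normalized:
--             continue
--         if normalized in seen:
--             continue
--         seen.add(normalized)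
--         cleaned.append(normalized)
--     return cleaned
-- ===== SOURCE B (Python) =====
-- def parse_nitter_markdown(markdown):
--     def keep(line):
--         simplified = line.replace(",", "").replace(".", "")
--         return not (
--             line.startswith("Title:") or line.startswith("URL Source:") or line.startswith("Markdown Content:")
--             or line.startswith("Warning:")
--             or (line.startswith("[![") and "](" in line)
--             or line.startswith("[]")
--             or "| nitter" in line
--             or line.startswith("http://nitter.net") or line.startswith("https://nitter.net")
--             or line.startswith("* ")
--             or simplified.isdigit()
--             or all(ch in "-=_*" for ch in line)
--             or line in ("GIF", "Video")
--         )
--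
--     # split the stripped lines into blocks at blank lines, by repeated index/slice
--     toks = [l.strip() for l in markdown.splitlines()]
--     blocks = []
--     while "" in toks:
--         i = toks.index("")
--         blocks.append(toks[:i])
--         toks = toks[i + 1:]
--     blocks.append(toks)
--
--     posts = [" ".join(" ".join([l for l in b if keep(l)]).split()) for b in blocks]
--
--     out = []
--     for p in posts:
--         if p and p not in out:
--             out.append(p)
--     return out
-- ===== Notes on version B (the rewrite author's own statement) =====
-- stated objective: alternative
-- what changed: B replaces A's stateful line-by-line accumulator with a staged pipeline: it splits the stripped lines into blocks by repeatedly locating the next blank line with index/slicing, normalizes each block in one comprehension, and dedups with a plain list-membership loop instead of a set alongside the output.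
import Mathlib
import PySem

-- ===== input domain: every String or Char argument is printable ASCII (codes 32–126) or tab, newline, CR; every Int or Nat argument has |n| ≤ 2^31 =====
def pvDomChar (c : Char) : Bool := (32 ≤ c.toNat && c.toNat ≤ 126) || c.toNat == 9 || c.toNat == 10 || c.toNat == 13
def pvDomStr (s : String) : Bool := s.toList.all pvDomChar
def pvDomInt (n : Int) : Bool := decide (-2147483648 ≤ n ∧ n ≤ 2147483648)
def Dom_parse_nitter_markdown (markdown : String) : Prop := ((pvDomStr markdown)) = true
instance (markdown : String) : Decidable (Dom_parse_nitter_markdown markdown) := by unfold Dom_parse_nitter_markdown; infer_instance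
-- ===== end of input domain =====

-- B splits the stripped lines into blank-separated blocks by repeated index/slice, normalizes each block in a comprehension, and dedups by list membership; return values proved equal.

-- ===== PORT A =====
-- first loop of A: state (posts, current)
def pvStepA (st : List String × List String) (raw_line : String) : List String × List String :=
  let line := PySem.Str.strip raw_line
  if line = "" then
    (if st.2 = [] then st else (st.1 ++ [PySem.Str.join " " st.2], []))
  else if PySem.Str.startswith line "Title:" || PySem.Str.startswith line "URL Source:" || PySem.Str.startswith line "Markdown Content:" then st
  else if PySem.Str.startswith line "Warning:" then st
  else if PySem.Str.startswith line "[![" && PySem.Str.isIn "](" line then st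
  else if PySem.Str.startswith line "[]" then st
  else if PySem.Str.isIn "| nitter" line then st
  else if PySem.Str.startswith line "http://nitter.net" || PySem.Str.startswith line "https://nitter.net" then st
  else if PySem.Str.startswith line "* " then st
  else if PySem.Str.strIsdigit (PySem.Str.replace (PySem.Str.replace line "," "") "." "") then st
  else if line.toList.all (fun ch => ("-=_*".toList).contains ch) then st
  else if line = "GIF" || line = "Video" then st
  else (st.1, st.2 ++ [line])

-- second loop of A: state (cleaned, seen)
def pvDedupStep (acc : List String × PySem.Set String) (post : String) : List String × PySem.Set String :=
  let normalized := PySem.Str.join " " (PySem.Str.split₀ post)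
  if normalized = "" then acc
  else if PySem.Set.contains acc.2 normalized then acc
  else (acc.1 ++ [normalized], PySem.Set.add acc.2 normalized)

def parse_nitter_markdown (markdown : String) : List String :=
  let st := (PySem.Str.splitlines markdown).foldl pvStepA ([], [])
  let posts := if st.2 = [] then st.1 else st.1 ++ [PySem.Str.join " " st.2]
  (posts.foldl pvDedupStep ([], PySem.Set.empty)).1

-- ===== PORT B =====
def pvKeep (line : String) : Bool :=
  let simplified := PySem.Str.replace (PySem.Str.replace line "," "") "." ""
  !(PySem.Str.startswith line "Title:" || PySem.Str.startswith line "URL Source:" || PySem.Str.startswith line "Markdown Content:"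
    || PySem.Str.startswith line "Warning:"
    || (PySem.Str.startswith line "[![" && PySem.Str.isIn "](" line)
    || PySem.Str.startswith line "[]"
    || PySem.Str.isIn "| nitter" line
    || PySem.Str.startswith line "http://nitter.net" || PySem.Str.startswith line "https://nitter.net"
    || PySem.Str.startswith line "* "
    || PySem.Str.strIsdigit simplified
    || line.toList.all (fun ch => ("-=_*".toList).contains ch)
    || (line = "GIF" || line = "Video"))

-- Source B's while loop: split toks into blocks at the first "" via index/slice, accumulating blocks
def pvBlocksLoop (blocks : List (List String)) (toks : List String) : List (List String) :=
  if _h : "" ∈ toks then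
    match PySem.List.index? toks "" with
    | some i =>
        pvBlocksLoop (blocks ++ [PySem.List.slice toks none (some (i : Int))])
          (PySem.List.slice toks (some ((i : Int) + 1)) none)
    | none => blocks ++ [toks]
  else blocks ++ [toks]
termination_by toks.length
decreasing_by
  have hcast : ((i : Int) + 1) = (((i + 1 : Nat)) : Int) := by push_cast; try ring
  rw [hcast, PySem.List.slice_from_natCast]
  have hne : toks ≠ [] := by rintro rfl; simp at _h
  have := List.length_pos_iff.mpr hne
  simp only [List.length_drop]; omega

-- normalization of a block (" ".join((" ".join(b)).split()))
def pvNorm (b : List String) : String :=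
  PySem.Str.join " " (PySem.Str.split₀ (PySem.Str.join " " b))

-- Source B's final dedup loop body
def pvOutStep (out : List String) (p : String) : List String :=
  if p ≠ "" ∧ p ∉ out then out ++ [p] else out

def parse_nitter_markdown_alt (markdown : String) : List String :=
  let toks := (PySem.Str.splitlines markdown).map PySem.Str.strip
  let blocks := pvBlocksLoop [] toks
  let posts := blocks.map (fun b => pvNorm (b.filter pvKeep))
  posts.foldl pvOutStep []

-- ===== PRECONDITION & SPEC =====
def Spec_parse_nitter_markdown (markdown : String) (out : List String) : Prop := out = parse_nitter_markdown_alt markdown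
instance (markdown : String) (out : List String) : Decidable (Spec_parse_nitter_markdown markdown out) := by unfold Spec_parse_nitter_markdown; infer_instance

-- ===== CLAIM (what is proved, stated in full; the proofs are below) =====
def Claim_equal_parse_nitter_markdown : Prop := ∀ (markdown : String), Dom_parse_nitter_markdown markdown → Spec_parse_nitter_markdown markdown (parse_nitter_markdown markdown)

-- ===== LEMMAS AND PROOFS =====

-- a guard chain returning st, in one-decision form
theorem pvChain {α : Type} (a b c w e f g h1 h2 sw dg al p q : Bool) (s t : α) :
    (if a || b || c then s else if w then s else if e then s else if f then s else if g then s
     else if h1 || h2 then s else if sw then s else if dg then s else if al then s else if p || q then s else t)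
    = if !(a || b || c || w || e || f || g || h1 || h2 || sw || dg || al || (p || q)) then t else s := by
  cases a <;> simp
  cases b <;> simp
  cases c <;> simp
  cases w <;> simp
  cases e <;> simp
  cases f <;> simp
  cases g <;> simp
  cases h1 <;> simp
  cases h2 <;> simp
  cases sw <;> simp
  cases dg <;> simp
  cases al <;> simp
  cases p <;> simp
  cases q <;> simp

-- A's step on an already-stripped token
def pvTokStep (st : List String × List String) (line : String) : List String × List String :=
  if line = "" then (if st.2 = [] then st else (st.1 ++ [PySem.Str.join " " st.2], []))
  else if pvKeep line then (st.1, st.2 ++ [line]) else st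

-- A's step, in one-decision form
theorem pvStepA_canon (st : List String × List String) (raw : String) :
    pvStepA st raw = pvTokStep st (PySem.Str.strip raw) := by
  simp only [pvStepA, pvTokStep, pvKeep]
  by_cases h : PySem.Str.strip raw = ""
  · simp [h]
  · simp only [if_neg h]
    exact pvChain _ _ _ _ _ _ _ _ _ _ _ _ _ _ _ _

-- one-step unfolding of pvBlocksLoop in terms of index?
theorem pvBlocksLoop_eq (bs : List (List String)) (toks : List String) :
    pvBlocksLoop bs toks =
      match PySem.List.index? toks "" with
      | some i =>
          pvBlocksLoop (bs ++ [PySem.List.slice toks none (some (i : Int))])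
            (PySem.List.slice toks (some ((i : Int) + 1)) none)
      | none => bs ++ [toks] := by
  rw [pvBlocksLoop]
  by_cases hm : "" ∈ toks
  · rw [dif_pos hm]
  · rw [dif_neg hm, (PySem.List.index?_eq_none_iff toks "").mpr hm]

-- accumulator extraction for B's block-splitting loop
theorem pvBlocksLoop_acc : ∀ (n : Nat) (toks : List String), toks.length = n →
    ∀ bs : List (List String), pvBlocksLoop bs toks = bs ++ pvBlocksLoop [] toks := by
  intro n
  induction n using Nat.strong_induction_on with
  | _ n ih =>
    intro toks hn bs
    rw [pvBlocksLoop_eq bs toks, pvBlocksLoop_eq [] toks]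
    cases hi : PySem.List.index? toks "" with
    | none => simp
    | some i =>
      dsimp only
      have hne : toks ≠ [] := by
        rintro rfl; simp [PySem.List.index?] at hi
      have hcast : ((i : Int) + 1) = (((i + 1 : Nat)) : Int) := by push_cast; try ring
      simp only [hcast, PySem.List.slice_from_natCast]
      have hlt : (toks.drop (i + 1)).length < n := by
        have := List.length_pos_iff.mpr hne
        simp only [List.length_drop]; omega
      rw [ih _ hlt _ rfl (bs ++ [PySem.List.slice toks none (some (i : Int))]),
          ih _ hlt _ rfl ([] ++ [PySem.List.slice toks none (some (i : Int))])]
      simp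

theorem pvBlocksLoop_acc' (bs : List (List String)) (toks : List String) :
    pvBlocksLoop bs toks = bs ++ pvBlocksLoop [] toks :=
  pvBlocksLoop_acc toks.length toks rfl bs

-- structural forms of pvBlocksLoop []
theorem pvBlocks_nil : pvBlocksLoop [] [] = [[]] := by
  rw [pvBlocksLoop_eq, (PySem.List.index?_eq_none_iff ([] : List String) "").mpr (by simp)]
  rfl

theorem pvBlocks_ne_nil (toks : List String) : pvBlocksLoop [] toks ≠ [] := by
  rw [pvBlocksLoop_eq]
  cases hi : PySem.List.index? toks "" with
  | none => simp
  | some i => dsimp only; rw [pvBlocksLoop_acc']; simp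

theorem pvBlocks_cons_blank (ts : List String) :
    pvBlocksLoop [] ("" :: ts) = [] :: pvBlocksLoop [] ts := by
  rw [pvBlocksLoop_eq]
  have h0 : PySem.List.index? ("" :: ts) "" = some 0 := PySem.List.index?_cons_self "" ts
  rw [h0]
  dsimp only
  have h1 : PySem.List.slice ("" :: ts) none (some ((0 : Nat) : Int)) = ([] : List String) := by
    rw [PySem.List.slice_to_natCast]; simp
  have h2 : PySem.List.slice ("" :: ts) (some (((0 : Nat) : Int) + 1)) none = ts := by
    have : (((0 : Nat) : Int) + 1) = ((1 : Nat) : Int) := by push_cast; try ring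
    rw [this, PySem.List.slice_from_natCast]
    exact List.drop_one.symm ▸ rfl
  simp only [Nat.cast_zero] at h1 h2 ⊢
  rw [h1, h2, pvBlocksLoop_acc']
  simp

theorem pvBlocks_cons (t : String) (ts : List String) (ht : t ≠ "") :
    pvBlocksLoop [] (t :: ts) = (t :: (pvBlocksLoop [] ts).headI) :: (pvBlocksLoop [] ts).tail := by
  by_cases hm : "" ∈ ts
  · obtain ⟨i, hi⟩ := Option.isSome_iff_exists.mp ((PySem.List.index?_isSome_iff ts "").mpr hm)
    have hti : PySem.List.index? (t :: ts) "" = some (i + 1) := by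
      rw [PySem.List.index?_cons_of_ne ts ht, hi]; rfl
    rw [pvBlocksLoop_eq [] (t :: ts), hti, pvBlocksLoop_eq [] ts, hi]
    dsimp only
    have e1 : PySem.List.slice (t :: ts) none (some ((i + 1 : Nat) : Int)) =
        t :: PySem.List.slice ts none (some (i : Int)) := by
      rw [PySem.List.slice_to_natCast, PySem.List.slice_to_natCast, List.take_succ_cons]
    have e2 : PySem.List.slice (t :: ts) (some (((i + 1 : Nat) : Int) + 1)) none =
        PySem.List.slice ts (some ((i : Int) + 1)) none := by
      have c1 : (((i + 1 : Nat) : Int) + 1) = ((i + 2 : Nat) : Int) := by push_cast; try ring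
      have c2 : ((i : Int) + 1) = ((i + 1 : Nat) : Int) := by push_cast; try ring
      rw [c1, c2, PySem.List.slice_from_natCast, PySem.List.slice_from_natCast, List.drop_succ_cons]
    rw [e1, e2, pvBlocksLoop_acc',
        pvBlocksLoop_acc' ([] ++ [PySem.List.slice ts none (some (i : Int))])]
    simp
  · have hm2 : "" ∉ t :: ts := by simp [hm, Ne.symm ht]
    rw [pvBlocksLoop_eq [] (t :: ts), (PySem.List.index?_eq_none_iff (t :: ts) "").mpr hm2,
        pvBlocksLoop_eq [] ts, (PySem.List.index?_eq_none_iff ts "").mpr hm]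
    simp

-- post extracted from a finished first-loop state
def pvFinal (st : List String × List String) : List String :=
  st.1 ++ (if st.2 = [] then [] else [PySem.Str.join " " st.2])

def pvJoinA (b : List String) : Option String :=
  if b = [] then none else some (PySem.Str.join " " b)

-- A's first loop produces exactly the nonempty kept blocks, joined
theorem pvA_main : ∀ (toks : List String) (p cur : List String) (b : List String) (bs : List (List String)),
    pvBlocksLoop [] toks = b :: bs →
    pvFinal (toks.foldl pvTokStep (p, cur)) =
      p ++ (((cur ++ b.filter pvKeep) :: bs.map (·.filter pvKeep)).filterMap pvJoinA) := by
  intro toks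
  induction toks with
  | nil =>
    intro p cur b bs h
    rw [pvBlocks_nil] at h
    obtain ⟨rfl, rfl⟩ : b = [] ∧ bs = [] := by
      constructor <;> injection h <;> simp_all
    by_cases hc : cur = [] <;> simp [pvFinal, pvJoinA, hc]
  | cons t ts ih =>
    intro p cur b bs h
    simp only [List.foldl_cons]
    by_cases ht : t = ""
    · subst ht
      rw [pvBlocks_cons_blank] at h
      obtain ⟨b0, bs0, hts⟩ := List.exists_cons_of_ne_nil (pvBlocks_ne_nil ts)
      have hb : b = [] := by injection h with h1 _; exact h1.symm
      have hbs : bs = pvBlocksLoop [] ts := by injection h with _ h2; exact h2.symm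
      subst hb; subst hbs
      rw [hts]
      show pvFinal (ts.foldl pvTokStep (pvTokStep (p, cur) "")) = _
      by_cases hc : cur = []
      · have : pvTokStep (p, cur) "" = (p, cur) := by simp [pvTokStep, hc]
        rw [this, hc, ih p [] b0 bs0 hts]
        simp [pvJoinA]
      · have : pvTokStep (p, cur) "" = (p ++ [PySem.Str.join " " cur], []) := by
          simp [pvTokStep, hc]
        rw [this, ih (p ++ [PySem.Str.join " " cur]) [] b0 bs0 hts]
        simp [pvJoinA, hc]
    · rw [pvBlocks_cons t ts ht] at h
      obtain ⟨b0, bs0, hts⟩ := List.exists_cons_of_ne_nil (pvBlocks_ne_nil ts)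
      rw [hts] at h
      have hb : b = t :: b0 := by injection h with h1 _; simp_all
      have hbs : bs = bs0 := by injection h with _ h2; simp_all
      subst hb; subst hbs
      by_cases hk : pvKeep t
      · have : pvTokStep (p, cur) t = (p, cur ++ [t]) := by simp [pvTokStep, ht, hk]
        rw [this, ih p (cur ++ [t]) b0 _ hts]
        simp [hk]
      · have : pvTokStep (p, cur) t = (p, cur) := by simp [pvTokStep, ht, hk]
        rw [this, ih p cur b0 _ hts]
        simp [hk]

-- A's dedup fold over the joined nonempty blocks = B's membership dedup over the normalized blocks
theorem pvDedup_eq : ∀ (bsK : List (List String)) (cl : List String),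
    (bsK.filterMap pvJoinA).foldl pvDedupStep (cl, cl) =
      ((bsK.map pvNorm).foldl pvOutStep cl, (bsK.map pvNorm).foldl pvOutStep cl) := by
  intro bsK
  induction bsK with
  | nil => intro cl; simp
  | cons b rest ih =>
    intro cl
    by_cases hb : b = []
    · have hnorm : pvNorm b = "" := by subst hb; decide
      have hj : pvJoinA b = none := by simp [pvJoinA, hb]
      rw [List.filterMap_cons, hj, List.map_cons, List.foldl_cons, hnorm]
      have : pvOutStep cl "" = cl := by simp [pvOutStep]
      rw [this]; exact ih cl
    · have hj : pvJoinA b = some (PySem.Str.join " " b) := by simp [pvJoinA, hb]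
      rw [List.filterMap_cons, hj, List.map_cons, List.foldl_cons, List.foldl_cons]
      have hpn : pvNorm b = PySem.Str.join " " (PySem.Str.split₀ (PySem.Str.join " " b)) := rfl
      by_cases h0 : PySem.Str.join " " (PySem.Str.split₀ (PySem.Str.join " " b)) = ""
      · have hstep : pvDedupStep (cl, cl) (PySem.Str.join " " b) = (cl, cl) := by
          simp [pvDedupStep, h0]
        have hout : pvOutStep cl (pvNorm b) = cl := by simp [pvOutStep, hpn, h0]
        rw [hstep, hout]; exact ih cl
      · by_cases hmem : PySem.Str.join " " (PySem.Str.split₀ (PySem.Str.join " " b)) ∈ cl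
        · have hstep : pvDedupStep (cl, cl) (PySem.Str.join " " b) = (cl, cl) := by
            simp [pvDedupStep, h0, PySem.Set.contains, hmem]
          have hout : pvOutStep cl (pvNorm b) = cl := by simp [pvOutStep, hpn, hmem]
          rw [hstep, hout]; exact ih cl
        · have hstep : pvDedupStep (cl, cl) (PySem.Str.join " " b) =
              (cl ++ [pvNorm b], cl ++ [pvNorm b]) := by
            simp [pvDedupStep, h0, PySem.Set.contains, PySem.Set.add, hmem, hpn]
          have hout : pvOutStep cl (pvNorm b) = cl ++ [pvNorm b] := by
            simp [pvOutStep, hpn, h0, hmem]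
          rw [hstep, hout]; exact ih (cl ++ [pvNorm b])

-- ===== VERDICT (by name: the statement is the Claim_ definition above) =====
theorem parse_nitter_markdown_spec : Claim_equal_parse_nitter_markdown := by
  intro md _
  unfold Spec_parse_nitter_markdown parse_nitter_markdown parse_nitter_markdown_alt
  have hfold : (PySem.Str.splitlines md).foldl pvStepA ([], []) =
      ((PySem.Str.splitlines md).map PySem.Str.strip).foldl pvTokStep ([], []) := by
    rw [List.foldl_map]
    exact congrFun (congrFun (congrArg List.foldl (funext fun st => funext fun raw =>
      pvStepA_canon st raw)) ([], [])) _
  obtain ⟨b, bs, hbs⟩ := List.exists_cons_of_ne_nil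
    (pvBlocks_ne_nil ((PySem.Str.splitlines md).map PySem.Str.strip))
  have hposts :
      (let st := (PySem.Str.splitlines md).foldl pvStepA ([], []);
        if st.2 = [] then st.1 else st.1 ++ [PySem.Str.join " " st.2]) =
      ((b :: bs).map (·.filter pvKeep)).filterMap pvJoinA := by
    have hA := pvA_main ((PySem.Str.splitlines md).map PySem.Str.strip) [] [] b bs hbs
    rw [hfold]
    have : pvFinal (((PySem.Str.splitlines md).map PySem.Str.strip).foldl pvTokStep ([], [])) =
        ((b :: bs).map (·.filter pvKeep)).filterMap pvJoinA := by
      rw [hA]; simp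
    rw [← this]
    unfold pvFinal
    split_ifs with h <;> simp [h]
  simp only at hposts ⊢
  rw [hposts, hbs]
  have hset : (([], PySem.Set.empty) : List String × PySem.Set String) = (([] : List String), ([] : List String)) := rfl
  rw [hset, pvDedup_eq]
  simp [List.map_map, Function.comp_def]
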